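-- pv_equiv track=rewrite | github.com/aciderix/Graph-Systems-Exploration | numerical_semigroups/phases/counterexample_random.py | is_valid_kunz
-- ===== SOURCE A (Python) =====
-- def is_valid_kunz(k, m):
--     """Check if a Kunz tuple satisfies all constraints."""
--     n = m - 1
--     # no-carry: k_r <= k_a + k_b for a+b=r, 1<=a,b<=n
--     for r in range(1, m):
--         kr = k[r - 1]
--         for a in range(1, r):
--             b = r - a
--             if 1 <= b <= n:
--                 if kr > k[a - 1] + k[b - 1]:
--                     return False
--     # carry: k_r <= k_a + k_b + 1 for a+b=r+m, 1<=a,b<=n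
--     for r in range(1, m):
--         kr = k[r - 1]
--         for a in range(r + 1, m):
--             b = r + m - a
--             if 1 <= b <= n:
--                 if kr > k[a - 1] + k[b - 1] + 1:
--                     return False
--     return True
-- ===== SOURCE B (Python) =====
-- def is_valid_kunz(k, m):
--     """Check if a Kunz tuple satisfies all constraints.
--
--     Two stages: first build the min-plus self-convolution table
--     conv[s] = min(k[a-1] + k[b-1] for a + b == s, 1 <= a <= b <= n),
--     then validate every sum with two linear scans against the table:
--     no-carry sums (2..n) and carry sums (m+1..2n).
--     """
--     n = m - 1
--     conv = {}
--     for a in range(1, n + 1):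
--         for b in range(a, n + 1):
--             s = a + b
--             v = k[a - 1] + k[b - 1]
--             if s not in conv or v < conv[s]:
--                 conv[s] = v
--     return all(k[s - 1] <= conv[s] for s in range(2, n + 1)) and \
--            all(k[s - m - 1] <= conv[s] + 1 for s in range(m + 1, 2 * n + 1))
-- ===== Notes on version B (the rewrite author's own statement) =====
-- stated objective: alternative
-- what changed: Instead of testing each inequality pairwise, B first builds the min-plus self-convolution table conv[s] = min k[a-1]+k[b-1] over a+b=s (one pass over a<=b), then validates all no-carry and carry bounds with two linear scans comparing k against the table.
-- outside the precondition, e.g. on is_valid_kunz([0, 5], 4): A returns False, B raises IndexError; on is_valid_kunz([0, 0], 4): A raises IndexError, B raises IndexError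
import Mathlib
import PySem

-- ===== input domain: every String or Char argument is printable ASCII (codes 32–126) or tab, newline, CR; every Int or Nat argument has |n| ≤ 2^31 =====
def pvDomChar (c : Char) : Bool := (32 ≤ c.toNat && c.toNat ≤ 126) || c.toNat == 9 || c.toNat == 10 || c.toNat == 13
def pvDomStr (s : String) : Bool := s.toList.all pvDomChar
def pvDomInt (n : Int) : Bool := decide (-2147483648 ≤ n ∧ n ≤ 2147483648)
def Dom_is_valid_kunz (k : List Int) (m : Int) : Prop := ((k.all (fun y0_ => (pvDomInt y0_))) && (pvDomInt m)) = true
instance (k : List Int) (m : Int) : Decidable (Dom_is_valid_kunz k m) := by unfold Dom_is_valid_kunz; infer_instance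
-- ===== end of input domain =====

-- B replaces A's per-pair inequality checks by a staged algorithm: build the min-plus
-- self-convolution table of k once, then validate with two linear scans; objective:
-- alternative (table-then-scan decomposition), same overall cost.

-- ===== PORT A =====
-- indexing is via pyGetD with default 0; Pre_ guarantees every accessed index is in range,
-- so the default is never consulted on admitted inputs. Python's `range` is lazy and the
-- loops return False early, so each loop is ported as an early-exit counter recursion; the
-- Nat fuel argument (the loop's remaining iteration count) is a totality guard only.

-- inner loop of pass 1: for a in range(a, r): …
def kunzInner1 (k : List Int) (n kr r a : Int) : Nat → Bool
  | 0 => true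
  | fuel + 1 =>
    if a < r then
      (if 1 ≤ r - a ∧ r - a ≤ n then
         if kr > PySem.List.pyGetD k (a - 1) 0 + PySem.List.pyGetD k (r - a - 1) 0 then false
         else kunzInner1 k n kr r (a + 1) fuel
       else kunzInner1 k n kr r (a + 1) fuel)
    else true

-- pass 1: for r in range(r, m): …
def kunzOuter1 (k : List Int) (m n r : Int) : Nat → Bool
  | 0 => true
  | fuel + 1 =>
    if r < m then
      (if kunzInner1 k n (PySem.List.pyGetD k (r - 1) 0) r 1 ((r - 1).toNat) then
         kunzOuter1 k m n (r + 1) fuel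
       else false)
    else true

-- inner loop of pass 2: for a in range(a, m): …  (b = r + m - a)
def kunzInner2 (k : List Int) (m n kr r a : Int) : Nat → Bool
  | 0 => true
  | fuel + 1 =>
    if a < m then
      (if 1 ≤ r + m - a ∧ r + m - a ≤ n then
         if kr > PySem.List.pyGetD k (a - 1) 0 + PySem.List.pyGetD k (r + m - a - 1) 0 + 1 then
           false
         else kunzInner2 k m n kr r (a + 1) fuel
       else kunzInner2 k m n kr r (a + 1) fuel)
    else true

-- pass 2: for r in range(r, m): …
def kunzOuter2 (k : List Int) (m n r : Int) : Nat → Bool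
  | 0 => true
  | fuel + 1 =>
    if r < m then
      (if kunzInner2 k m n (PySem.List.pyGetD k (r - 1) 0) r (r + 1) ((m - r - 1).toNat) then
         kunzOuter2 k m n (r + 1) fuel
       else false)
    else true

def is_valid_kunz (k : List Int) (m : Int) : Bool :=
  let n := m - 1
  kunzOuter1 k m n 1 ((m - 1).toNat) && kunzOuter2 k m n 1 ((m - 1).toNat)

-- ===== PORT B =====
-- conv is the Python dict; `conv[s]` in the scans is ported as getD _ s 0: the key is
-- always present on the scanned ranges (every such s is a reachable pair sum), so the
-- default is never consulted.
def is_valid_kunz_alt (k : List Int) (m : Int) : Bool :=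
  let n := m - 1
  let conv :=
    (PySem.List.pyRange 1 (n + 1) 1).foldl (fun d a =>
      (PySem.List.pyRange a (n + 1) 1).foldl (fun d b =>
        let s := a + b
        let v := PySem.List.pyGetD k (a - 1) 0 + PySem.List.pyGetD k (b - 1) 0
        if ¬ d.contains s ∨ v < d.getD s 0 then d.insert s v else d) d)
      PySem.Dict.empty
  ((PySem.List.pyRange 2 (n + 1) 1).all (fun s =>
      decide (PySem.List.pyGetD k (s - 1) 0 ≤ conv.getD s 0)))
  &&
  ((PySem.List.pyRange (m + 1) (2 * n + 1) 1).all (fun s =>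
      decide (PySem.List.pyGetD k (s - m - 1) 0 ≤ conv.getD s 0 + 1)))

-- ===== PRECONDITION & SPEC =====
-- Pre_ excludes k shorter than the m-1 entries a Kunz tuple for multiplicity m has: there
-- A eventually raises IndexError, except when it happens to hit a violation first and
-- returns False early — an accident of visit order; B raises IndexError while building its
-- table on such inputs.
def Pre_is_valid_kunz (k : List Int) (m : Int) : Prop := m - 1 ≤ (k.length : Int)
instance (k : List Int) (m : Int) : Decidable (Pre_is_valid_kunz k m) := by unfold Pre_is_valid_kunz; infer_instance
def pvWitness_is_valid_kunz : List Int × Int := ([0, 0, 0], 4)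
def Spec_is_valid_kunz (k : List Int) (m : Int) (out : Bool) : Prop := out = is_valid_kunz_alt k m
instance (k : List Int) (m : Int) (out : Bool) : Decidable (Spec_is_valid_kunz k m out) := by unfold Spec_is_valid_kunz; infer_instance

-- ===== CLAIM (what is proved, stated in full; the proofs are below) =====
def Claim_equal_is_valid_kunz : Prop := ∀ (k : List Int) (m : Int), Dom_is_valid_kunz k m → Pre_is_valid_kunz k m → Spec_is_valid_kunz k m (is_valid_kunz k m)

-- ===== LEMMAS AND PROOFS =====

-- the value both programs associate to a pair (a, b)
def kval (k : List Int) (a b : Int) : Int :=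
  PySem.List.pyGetD k (a - 1) 0 + PySem.List.pyGetD k (b - 1) 0

-- canonical constraint sets both programs test
def noCarryOK (k : List Int) (m : Int) : Prop :=
  ∀ a b : Int, 1 ≤ a → 1 ≤ b → a + b ≤ m - 1 →
    PySem.List.pyGetD k (a + b - 1) 0 ≤ kval k a b

def carryOK (k : List Int) (m : Int) : Prop :=
  ∀ a b : Int, 1 ≤ a → a ≤ m - 1 → 1 ≤ b → b ≤ m - 1 → m < a + b →
    PySem.List.pyGetD k (a + b - m - 1) 0 ≤ kval k a b + 1

theorem inner1_iff (k : List Int) (n kr r : Int) (fuel : Nat) (a0 : Int)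
    (hfuel : (r - a0).toNat ≤ fuel) :
    kunzInner1 k n kr r a0 fuel = true ↔
      ∀ a, a0 ≤ a → a < r → 1 ≤ r - a → r - a ≤ n →
        kr ≤ PySem.List.pyGetD k (a - 1) 0 + PySem.List.pyGetD k (r - a - 1) 0 := by
  induction fuel generalizing a0 with
  | zero =>
    simp only [kunzInner1]
    constructor
    · intro _ a ha _ _ _; omega
    · intro _; trivial
  | succ f ih =>
    simp only [kunzInner1]
    by_cases har : a0 < r
    · rw [if_pos har]
      have hrec := ih (a0 + 1) (by omega)
      split_ifs with hb hv
      · simp only [false_iff]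
        intro h
        exact absurd (h a0 le_rfl har hb.1 hb.2) (by omega)
      · rw [hrec]
        constructor
        · intro h a ha1 ha2 ha3 ha4
          rcases eq_or_lt_of_le ha1 with rfl | ha1'
          · omega
          · exact h a (by omega) ha2 ha3 ha4
        · intro h a ha1 ha2 ha3 ha4
          exact h a (by omega) ha2 ha3 ha4
      · rw [hrec]
        constructor
        · intro h a ha1 ha2 ha3 ha4
          rcases eq_or_lt_of_le ha1 with rfl | ha1'
          · exact absurd ⟨ha3, ha4⟩ hb
          · exact h a (by omega) ha2 ha3 ha4
        · intro h a ha1 ha2 ha3 ha4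
          exact h a (by omega) ha2 ha3 ha4
    · rw [if_neg har]
      constructor
      · intro _ a ha1 ha2 _ _; omega
      · intro _; trivial

theorem outer1_iff (k : List Int) (m n : Int) (fuel : Nat) (r0 : Int)
    (hfuel : (m - r0).toNat ≤ fuel) :
    kunzOuter1 k m n r0 fuel = true ↔
      ∀ r, r0 ≤ r → r < m →
        kunzInner1 k n (PySem.List.pyGetD k (r - 1) 0) r 1 ((r - 1).toNat) = true := by
  induction fuel generalizing r0 with
  | zero =>
    simp only [kunzOuter1]
    constructor
    · intro _ r hr1 hr2; omega
    · intro _; trivial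
  | succ f ih =>
    simp only [kunzOuter1]
    by_cases hrm : r0 < m
    · rw [if_pos hrm]
      have hrec := ih (r0 + 1) (by omega)
      split_ifs with h0
      · rw [hrec]
        constructor
        · intro h r hr1 hr2
          rcases eq_or_lt_of_le hr1 with rfl | hr1'
          · exact h0
          · exact h r (by omega) hr2
        · intro h r hr1 hr2
          exact h r (by omega) hr2
      · simp only [false_iff]
        intro h
        exact h0 (h r0 le_rfl hrm)
    · rw [if_neg hrm]
      constructor
      · intro _ r hr1 hr2; omega
      · intro _; trivial

theorem inner2_iff (k : List Int) (m n kr r : Int) (fuel : Nat) (a0 : Int)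
    (hfuel : (m - a0).toNat ≤ fuel) :
    kunzInner2 k m n kr r a0 fuel = true ↔
      ∀ a, a0 ≤ a → a < m → 1 ≤ r + m - a → r + m - a ≤ n →
        kr ≤ PySem.List.pyGetD k (a - 1) 0 + PySem.List.pyGetD k (r + m - a - 1) 0 + 1 := by
  induction fuel generalizing a0 with
  | zero =>
    simp only [kunzInner2]
    constructor
    · intro _ a ha _ _ _; omega
    · intro _; trivial
  | succ f ih =>
    simp only [kunzInner2]
    by_cases ham : a0 < m
    · rw [if_pos ham]
      have hrec := ih (a0 + 1) (by omega)
      split_ifs with hb hv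
      · simp only [false_iff]
        intro h
        exact absurd (h a0 le_rfl ham hb.1 hb.2) (by omega)
      · rw [hrec]
        constructor
        · intro h a ha1 ha2 ha3 ha4
          rcases eq_or_lt_of_le ha1 with rfl | ha1'
          · omega
          · exact h a (by omega) ha2 ha3 ha4
        · intro h a ha1 ha2 ha3 ha4
          exact h a (by omega) ha2 ha3 ha4
      · rw [hrec]
        constructor
        · intro h a ha1 ha2 ha3 ha4
          rcases eq_or_lt_of_le ha1 with rfl | ha1'
          · exact absurd ⟨ha3, ha4⟩ hb
          · exact h a (by omega) ha2 ha3 ha4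
        · intro h a ha1 ha2 ha3 ha4
          exact h a (by omega) ha2 ha3 ha4
    · rw [if_neg ham]
      constructor
      · intro _ a ha1 ha2 _ _; omega
      · intro _; trivial

theorem outer2_iff (k : List Int) (m n : Int) (fuel : Nat) (r0 : Int)
    (hfuel : (m - r0).toNat ≤ fuel) :
    kunzOuter2 k m n r0 fuel = true ↔
      ∀ r, r0 ≤ r → r < m →
        kunzInner2 k m n (PySem.List.pyGetD k (r - 1) 0) r (r + 1) ((m - r - 1).toNat) = true := by
  induction fuel generalizing r0 with
  | zero =>
    simp only [kunzOuter2]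
    constructor
    · intro _ r hr1 hr2; omega
    · intro _; trivial
  | succ f ih =>
    simp only [kunzOuter2]
    by_cases hrm : r0 < m
    · rw [if_pos hrm]
      have hrec := ih (r0 + 1) (by omega)
      split_ifs with h0
      · rw [hrec]
        constructor
        · intro h r hr1 hr2
          rcases eq_or_lt_of_le hr1 with rfl | hr1'
          · exact h0
          · exact h r (by omega) hr2
        · intro h r hr1 hr2
          exact h r (by omega) hr2
      · simp only [false_iff]
        intro h
        exact h0 (h r0 le_rfl hrm)
    · rw [if_neg hrm]
      constructor
      · intro _ r hr1 hr2; omega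
      · intro _; trivial

theorem a_iff (k : List Int) (m : Int) :
    is_valid_kunz k m = true ↔ noCarryOK k m ∧ carryOK k m := by
  simp only [is_valid_kunz, Bool.and_eq_true,
    outer1_iff k m (m - 1) ((m - 1).toNat) 1 (by omega),
    outer2_iff k m (m - 1) ((m - 1).toNat) 1 (by omega)]
  constructor
  · rintro ⟨h1, h2⟩
    constructor
    · intro a b ha hb hab
      have h := (inner1_iff k (m - 1) _ (a + b) _ 1 (by omega)).1
        (h1 (a + b) (by omega) (by omega)) a (by omega) (by omega) (by omega) (by omega)
      simpa [kval, show a + b - a = b by ring] using h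
    · intro a b ha ha' hb hb' hab
      have h := (inner2_iff k m (m - 1) _ (a + b - m) _ (a + b - m + 1) (by omega)).1
        (h2 (a + b - m) (by omega) (by omega)) a (by omega) (by omega) (by omega) (by omega)
      simpa [kval, show a + b - m + m - a = b by ring] using h
  · rintro ⟨h1, h2⟩
    constructor
    · intro r hr1 hr2
      rw [inner1_iff k (m - 1) _ r _ 1 (by omega)]
      intro a ha1 ha2 ha3 ha4
      have h := h1 a (r - a) (by omega) (by omega) (by omega)
      simpa [kval, show a + (r - a) = r by ring] using h
    · intro r hr1 hr2
      rw [inner2_iff k m (m - 1) _ r _ (r + 1) (by omega)]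
      intro a ha1 ha2 ha3 ha4
      have h := h2 a (r + m - a) (by omega) (by omega) (by omega) (by omega) (by omega)
      simpa [kval, show a + (r + m - a) - m = r by ring] using h

-- the table-building step of B, on an explicit pair
def convStep (k : List Int) (d : PySem.Dict Int Int) (p : Int × Int) : PySem.Dict Int Int :=
  if ¬ d.contains (p.1 + p.2) ∨ kval k p.1 p.2 < d.getD (p.1 + p.2) 0
  then d.insert (p.1 + p.2) (kval k p.1 p.2) else d

-- invariant of the table fold, relative to the list of pairs processed so far
def ConvInv (k : List Int) (ps : List (Int × Int)) (d : PySem.Dict Int Int) : Prop :=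
  (∀ p ∈ ps, d.contains (p.1 + p.2) = true ∧ d.getD (p.1 + p.2) 0 ≤ kval k p.1 p.2) ∧
  (∀ s v, d.get? s = some v → ∃ p ∈ ps, p.1 + p.2 = s ∧ kval k p.1 p.2 = v)

theorem convStep_inv (k : List Int) (ps : List (Int × Int)) (d : PySem.Dict Int Int)
    (h : ConvInv k ps d) (q : Int × Int) : ConvInv k (ps ++ [q]) (convStep k d q) := by
  obtain ⟨h1, h2⟩ := h
  unfold convStep
  split_ifs with hc
  · constructor
    · intro p hp
      rcases List.mem_append.1 hp with hp | hp
      · by_cases hs : p.1 + p.2 = q.1 + q.2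
        · refine ⟨by rw [hs]; exact PySem.Dict.contains_insert_self _ _ _, ?_⟩
          rw [hs, PySem.Dict.getD_insert_self]
          rcases hc with hc | hc
          · exact absurd ((h1 p hp).1) (by rw [hs] at *; simpa using hc)
          · have := (h1 p hp).2; rw [hs] at this; omega
        · refine ⟨?_, ?_⟩
          · rw [PySem.Dict.contains_insert]
            simp [(h1 p hp).1]
          · rw [PySem.Dict.getD_insert, if_neg hs]
            exact (h1 p hp).2
      · simp only [List.mem_singleton] at hp; subst hp
        exact ⟨PySem.Dict.contains_insert_self _ _ _, by rw [PySem.Dict.getD_insert_self]⟩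
    · intro s v hv
      by_cases hs : s = q.1 + q.2
      · subst hs
        rw [PySem.Dict.get?_insert_self] at hv
        exact ⟨q, by simp, rfl, Option.some.inj hv⟩
      · rw [PySem.Dict.get?_insert, if_neg hs] at hv
        obtain ⟨p, hp, hps, hpv⟩ := h2 s v hv
        exact ⟨p, List.mem_append.2 (Or.inl hp), hps, hpv⟩
  · rw [not_or, not_not, not_lt] at hc
    constructor
    · intro p hp
      rcases List.mem_append.1 hp with hp | hp
      · exact h1 p hp
      · simp only [List.mem_singleton] at hp; subst hp
        exact ⟨hc.1, hc.2⟩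
    · intro s v hv
      obtain ⟨p, hp, hps, hpv⟩ := h2 s v hv
      exact ⟨p, List.mem_append.2 (Or.inl hp), hps, hpv⟩

theorem foldl_convStep_inv (k : List Int) (l ps : List (Int × Int)) (d : PySem.Dict Int Int)
    (h : ConvInv k ps d) : ConvInv k (ps ++ l) (l.foldl (convStep k) d) := by
  induction l generalizing ps d with
  | nil => simpa using h
  | cons q t ih =>
    have := ih (ps ++ [q]) (convStep k d q) (convStep_inv k ps d h q)
    simpa using this

-- the full pair list B's nested folds traverse
def convPairs (n : Int) : List (Int × Int) :=
  (PySem.List.pyRange 1 (n + 1) 1).flatMap (fun a =>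
    (PySem.List.pyRange a (n + 1) 1).map (fun b => (a, b)))

theorem mem_convPairs (n : Int) (p : Int × Int) :
    p ∈ convPairs n ↔ 1 ≤ p.1 ∧ p.1 ≤ p.2 ∧ p.2 ≤ n := by
  cases p with
  | mk a b =>
    simp only [convPairs, List.mem_flatMap, List.mem_map, PySem.List.mem_pyRange_one,
      Prod.mk.injEq]
    constructor
    · rintro ⟨a', ⟨ha1, ha2⟩, b', ⟨hb1, hb2⟩, rfl, rfl⟩
      exact ⟨ha1, hb1, by omega⟩
    · rintro ⟨h1, h2, h3⟩
      exact ⟨a, ⟨h1, by omega⟩, b, ⟨h2, by omega⟩, rfl, rfl⟩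

-- B's nested folds equal the single fold over convPairs
theorem nested_fold_eq (k : List Int) (n : Int) :
    (PySem.List.pyRange 1 (n + 1) 1).foldl (fun d a =>
      (PySem.List.pyRange a (n + 1) 1).foldl (fun d b =>
        if ¬ d.contains (a + b) ∨ kval k a b < d.getD (a + b) 0
        then d.insert (a + b) (kval k a b) else d) d)
      PySem.Dict.empty
    = (convPairs n).foldl (convStep k) PySem.Dict.empty := by
  unfold convPairs
  generalize PySem.List.pyRange 1 (n + 1) 1 = outer
  generalize PySem.Dict.empty = d0
  induction outer generalizing d0 with
  | nil => rfl
  | cons a t ih =>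
    simp only [List.foldl_cons, List.flatMap_cons, List.foldl_append]
    rw [← ih]
    congr 1
    generalize PySem.List.pyRange a (n + 1) 1 = inner
    induction inner generalizing d0 with
    | nil => rfl
    | cons b t' ih' =>
      simp only [List.foldl_cons, List.map_cons]
      rw [ih']
      rfl

-- specification of B's finished table
theorem conv_spec (k : List Int) (n : Int) :
    ConvInv k (convPairs n) ((convPairs n).foldl (convStep k) PySem.Dict.empty) := by
  have h0 : ConvInv k [] PySem.Dict.empty := by
    constructor
    · intro p hp; cases hp
    · intro s v hv; simp [PySem.Dict.get?_empty] at hv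
  simpa using foldl_convStep_inv k (convPairs n) [] PySem.Dict.empty h0

theorem b_iff (k : List Int) (m : Int) :
    is_valid_kunz_alt k m = true ↔ noCarryOK k m ∧ carryOK k m := by
  have hconv := conv_spec k (m - 1)
  have heq : is_valid_kunz_alt k m
      = ((((PySem.List.pyRange 2 (m - 1 + 1) 1).all (fun s =>
            decide (PySem.List.pyGetD k (s - 1) 0 ≤
              ((convPairs (m - 1)).foldl (convStep k) PySem.Dict.empty).getD s 0)))
        &&
        ((PySem.List.pyRange (m + 1) (2 * (m - 1) + 1) 1).all (fun s =>
            decide (PySem.List.pyGetD k (s - m - 1) 0 ≤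
              ((convPairs (m - 1)).foldl (convStep k) PySem.Dict.empty).getD s 0 + 1)))) : Bool) := by
    show ((((PySem.List.pyRange 2 (m - 1 + 1) 1).all (fun s =>
            decide (PySem.List.pyGetD k (s - 1) 0 ≤
              ((PySem.List.pyRange 1 (m - 1 + 1) 1).foldl (fun d a =>
                (PySem.List.pyRange a (m - 1 + 1) 1).foldl (fun d b =>
                  if ¬ d.contains (a + b) ∨ kval k a b < d.getD (a + b) 0
                  then d.insert (a + b) (kval k a b) else d) d)
                PySem.Dict.empty).getD s 0)))
        &&
        ((PySem.List.pyRange (m + 1) (2 * (m - 1) + 1) 1).all (fun s =>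
            decide (PySem.List.pyGetD k (s - m - 1) 0 ≤
              ((PySem.List.pyRange 1 (m - 1 + 1) 1).foldl (fun d a =>
                (PySem.List.pyRange a (m - 1 + 1) 1).foldl (fun d b =>
                  if ¬ d.contains (a + b) ∨ kval k a b < d.getD (a + b) 0
                  then d.insert (a + b) (kval k a b) else d) d)
                PySem.Dict.empty).getD s 0 + 1)))) : Bool) = _
    rw [nested_fold_eq]
  rw [heq]
  obtain ⟨hLB, hUB⟩ := hconv
  set D := (convPairs (m - 1)).foldl (convStep k) PySem.Dict.empty with hD
  simp only [Bool.and_eq_true, List.all_eq_true, PySem.List.mem_pyRange_one,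
    decide_eq_true_eq]
  constructor
  · rintro ⟨h1, h2⟩
    constructor
    · intro a b ha hb hab
      have hp : (min a b, max a b) ∈ convPairs (m - 1) := by
        rw [mem_convPairs]; constructor <;> [omega; constructor <;> omega]
      have hb' := (hLB _ hp).2
      have hval : kval k (min a b) (max a b) = kval k a b := by
        rcases le_total a b with h | h
        · rw [min_eq_left h, max_eq_right h]
        · rw [min_eq_right h, max_eq_left h]; unfold kval; ring
      have hsum : min a b + max a b = a + b := by omega
      rw [hsum, hval] at hb'
      have := h1 (a + b) ⟨by omega, by omega⟩
      omega
    · intro a b ha ha' hb hb' hab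
      have hp : (min a b, max a b) ∈ convPairs (m - 1) := by
        rw [mem_convPairs]; constructor <;> [omega; constructor <;> omega]
      have hbnd := (hLB _ hp).2
      have hval : kval k (min a b) (max a b) = kval k a b := by
        rcases le_total a b with h | h
        · rw [min_eq_left h, max_eq_right h]
        · rw [min_eq_right h, max_eq_left h]; unfold kval; ring
      have hsum : min a b + max a b = a + b := by omega
      rw [hsum, hval] at hbnd
      have := h2 (a + b) ⟨by omega, by omega⟩
      omega
  · rintro ⟨h1, h2⟩
    constructor
    · intro s hs
      -- the pair (1, s-1) witnesses that s is a key of the table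
      have hp : ((1 : Int), s - 1) ∈ convPairs (m - 1) := by
        rw [mem_convPairs]; refine ⟨le_refl _, by omega, by omega⟩
      have hcont := (hLB _ hp).1
      simp only [show (1 : Int) + (s - 1) = s by ring] at hcont
      have hsome : (D.get? s).isSome = true := by
        rw [← PySem.Dict.contains_eq_isSome_get?]; exact hcont
      obtain ⟨v, hv⟩ := Option.isSome_iff_exists.1 hsome
      obtain ⟨p, hpmem, hpsum, hpval⟩ := hUB s v hv
      rw [mem_convPairs] at hpmem
      have := h1 p.1 p.2 (by omega) (by omega) (by omega)
      rw [hpsum, hpval] at this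
      rw [PySem.Dict.getD_of_get?_eq_some _ _ hv]
      exact this
    · intro s hs
      -- the pair (s-(m-1), m-1) witnesses that s is a key of the table
      have hp : (s - (m - 1), m - 1) ∈ convPairs (m - 1) := by
        rw [mem_convPairs]; refine ⟨by omega, by omega, le_refl _⟩
      have hcont := (hLB _ hp).1
      simp only [show s - (m - 1) + (m - 1) = s by ring] at hcont
      have hsome : (D.get? s).isSome = true := by
        rw [← PySem.Dict.contains_eq_isSome_get?]; exact hcont
      obtain ⟨v, hv⟩ := Option.isSome_iff_exists.1 hsome
      obtain ⟨p, hpmem, hpsum, hpval⟩ := hUB s v hv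
      rw [mem_convPairs] at hpmem
      have := h2 p.1 p.2 (by omega) (by omega) (by omega) (by omega) (by omega)
      rw [hpsum, hpval] at this
      rw [PySem.Dict.getD_of_get?_eq_some _ _ hv]
      omega

-- ===== VERDICT (by name: the statement is the Claim_ definition above) =====
theorem is_valid_kunz_spec : Claim_equal_is_valid_kunz := by
  intro k m _ _
  unfold Spec_is_valid_kunz
  rw [Bool.eq_iff_iff, a_iff, b_iff]
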